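-- pv_equiv track=rewrite | github.com/maryzaria/courses | OOP/hash_function.py | hash_function
-- ===== SOURCE A (Python) =====
-- def hash_function(obj):
--     s = str(obj)
--     res1 = 0
--     while len(s) > 1:
--         res1 += ord(s[0]) * ord(s[-1])
--         s = s[1:-1]
--     s = str(obj)
--     if len(s) % 2 != 0:
--         res1 += ord(s[len(s) // 2])
--
--     res2 = sum(ord(let) * i * (-1) ** (i-1) for i, let in enumerate(s, start=1))
--
--     return (res1 * res2) % 123456791
-- ===== SOURCE B (Python) =====
-- def hash_function(obj):
--     s = str(obj)
--     n = len(s)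
--     res1 = 0
--     for i in range(n // 2):
--         res1 += ord(s[i]) * ord(s[n - 1 - i])
--     if n % 2 != 0:
--         res1 += ord(s[n // 2])
--     res2 = 0
--     sign = 1
--     for i, let in enumerate(s, start=1):
--         res2 += sign * i * ord(let)
--         sign = -sign
--     return (res1 * res2) % 123456791
-- ===== Notes on version B (the rewrite author's own statement) =====
-- stated objective: faster
-- what changed: res1 is computed in one index-based pass over the fixed string (s[i]*s[n-1-i] for i < n//2) instead of repeatedly rebuilding the string with s[1:-1] slices, and res2 uses a running sign toggle instead of recomputing (-1)**(i-1).
import Mathlib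
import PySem

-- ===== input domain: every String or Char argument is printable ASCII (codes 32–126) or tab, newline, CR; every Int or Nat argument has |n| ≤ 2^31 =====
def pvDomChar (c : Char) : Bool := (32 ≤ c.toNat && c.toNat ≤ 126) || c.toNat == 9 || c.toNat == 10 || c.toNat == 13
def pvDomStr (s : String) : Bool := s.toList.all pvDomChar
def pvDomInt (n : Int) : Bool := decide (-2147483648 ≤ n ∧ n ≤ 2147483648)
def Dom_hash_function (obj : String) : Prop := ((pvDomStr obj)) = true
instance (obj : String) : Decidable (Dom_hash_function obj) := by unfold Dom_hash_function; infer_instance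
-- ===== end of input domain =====

-- B replaces A's quadratic repeated s[1:-1] slicing by one index pass and a running sign toggle (faster).


-- ===== PORT A =====
-- ord(c)
def pvOrd (c : Char) : Int := (c.toNat : Int)

-- s[1:-1] computed once; used by the port's termination proof
lemma pvSlice1neg1 {α : Type} (cs : List α) :
    PySem.List.slice cs (some 1) (some (-1)) = cs.tail.dropLast := by
  cases cs with
  | nil => rfl
  | cons c t =>
    have h : ¬ ((t.length : Int) < 0) := by omega
    simp [PySem.List.slice, PySem.List.clampIdx, List.dropLast_eq_take, h]

-- 'while len(s) > 1: res1 += ord(s[0]) * ord(s[-1]); s = s[1:-1]'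
def pvALoop : List Char → Int → Int
  | cs, res1 =>
    if _h : cs.length > 1 then
      pvALoop (PySem.List.slice cs (some 1) (some (-1)))
        (res1 + pvOrd (PySem.List.pyGetD cs 0 ' ') * pvOrd (PySem.List.pyGetD cs (-1) ' '))
    else res1
termination_by cs => cs.length
decreasing_by
  rw [pvSlice1neg1]
  simp [List.length_dropLast, List.length_tail]
  omega

-- res2 = sum(ord(let) * i * (-1) ** (i-1) for i, let in enumerate(s, start=1))
-- (i ≥ 1 always, so the Python exponent i-1 is the nonnegative (p.1 - 1).toNat)
def pvARes2 (cs : List Char) : Int :=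
  ((PySem.List.enumerate cs 1).map (fun p => pvOrd p.2 * p.1 * (-1) ^ (p.1 - 1).toNat)).sum

def hash_function (obj : String) : Int :=
  let s := obj.toList
  let res1 := pvALoop s 0
  let res1 :=
    if PySem.Int.mod (s.length : Int) 2 ≠ 0 then
      res1 + pvOrd (PySem.List.pyGetD s (PySem.Int.floordiv (s.length : Int) 2) ' ')
    else res1
  PySem.Int.mod (res1 * pvARes2 s) 123456791

-- ===== PORT B =====
-- 'for i in range(n // 2): res1 += ord(s[i]) * ord(s[n - 1 - i])'
def pvBRes1 (cs : List Char) : Int :=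
  (PySem.List.pyRange 0 (PySem.Int.floordiv (cs.length : Int) 2) 1).foldl
    (fun r i =>
      r + pvOrd (PySem.List.pyGetD cs i ' ') * pvOrd (PySem.List.pyGetD cs ((cs.length : Int) - 1 - i) ' '))
    0

-- 'res2 = 0; sign = 1; for i, let in enumerate(s, 1): res2 += sign * i * ord(let); sign = -sign'
def pvBRes2 (cs : List Char) : Int :=
  ((PySem.List.enumerate cs 1).foldl
    (fun (p : Int × Int) e => (p.1 + p.2 * e.1 * pvOrd e.2, -p.2)) (0, 1)).1

def hash_function_alt (obj : String) : Int :=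
  let s := obj.toList
  let res1 := pvBRes1 s
  let res1 :=
    if PySem.Int.mod (s.length : Int) 2 ≠ 0 then
      res1 + pvOrd (PySem.List.pyGetD s (PySem.Int.floordiv (s.length : Int) 2) ' ')
    else res1
  PySem.Int.mod (res1 * pvBRes2 s) 123456791

-- ===== PRECONDITION & SPEC =====
def Spec_hash_function (obj : String) (out : Int) : Prop := out = hash_function_alt obj
instance (obj : String) (out : Int) : Decidable (Spec_hash_function obj out) := by unfold Spec_hash_function; infer_instance

-- ===== CLAIM (what is proved, stated in full; the proofs are below) =====
def Claim_equal_hash_function : Prop := ∀ (obj : String), Dom_hash_function obj → Spec_hash_function obj (hash_function obj)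

-- ===== LEMMAS AND PROOFS =====

-- Nat-indexed pair sum both res1 computations equal
def pvS (cs : List Char) : Int :=
  ((List.range (cs.length / 2)).map
    (fun k => pvOrd (cs.getD k ' ') * pvOrd (cs.getD (cs.length - 1 - k) ' '))).sum

lemma pvBRes1_eq_S (cs : List Char) : pvBRes1 cs = pvS cs := by
  unfold pvBRes1 pvS
  rw [PySem.List.foldl_add]
  have h2 : PySem.Int.floordiv (cs.length : Int) 2 = ((cs.length / 2 : Nat) : Int) := by
    exact_mod_cast PySem.Int.floordiv_natCast cs.length 2
  rw [h2, PySem.List.pyRange_one]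
  simp only [List.map_map, Int.sub_zero, Int.toNat_natCast, zero_add]
  congr 1
  apply List.map_congr_left
  intro k hk
  rw [List.mem_range] at hk
  have hklen : k < cs.length := by omega
  have hcast : ((cs.length : Int) - 1 - (k : Int)) = ((cs.length - 1 - k : Nat) : Int) := by omega
  simp [hcast, PySem.List.pyGetD_natCast]

lemma pvS_step (c d : Char) (mid : List Char) :
    pvS (c :: (mid ++ [d])) = pvOrd c * pvOrd d + pvS mid := by
  unfold pvS
  have hm : (c :: (mid ++ [d])).length = mid.length + 2 := by simp
  rw [hm]
  have hdiv : (mid.length + 2) / 2 = mid.length / 2 + 1 := by omega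
  rw [hdiv, List.range_succ_eq_map]
  simp only [List.map_cons, List.sum_cons, List.map_map]
  congr 1
  · have h0 : (c :: (mid ++ [d])).getD 0 ' ' = c := rfl
    have h1 : (c :: (mid ++ [d])).getD (mid.length + 2 - 1 - 0) ' ' = d := by
      simp [List.getD_eq_getElem?_getD]
    rw [h0, h1]
  · congr 1
    apply List.map_congr_left
    intro k hk
    rw [List.mem_range] at hk
    have hklt : k < mid.length := by omega
    simp only [Function.comp]
    have e1 : (c :: (mid ++ [d])).getD (k + 1) ' ' = mid.getD k ' ' := by
      simp [List.getD_eq_getElem?_getD, List.getElem?_append_left hklt]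
    have e2 : (c :: (mid ++ [d])).getD (mid.length + 2 - 1 - (k + 1)) ' ' = mid.getD (mid.length - 1 - k) ' ' := by
      have : mid.length + 2 - 1 - (k + 1) = (mid.length - 1 - k) + 1 := by omega
      rw [this]
      have hlt : mid.length - 1 - k < mid.length := by omega
      simp [List.getD_eq_getElem?_getD, List.getElem?_append_left hlt]
    rw [e1, e2]

lemma pvALoop_eq (N : Nat) : ∀ (cs : List Char), cs.length ≤ N → ∀ r, pvALoop cs r = r + pvS cs := by
  induction N with
  | zero =>
    intro cs hlen r
    have : cs = [] := List.length_eq_zero_iff.mp (by omega)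
    subst this
    simp [pvALoop, pvS]
  | succ n ih =>
    intro cs hlen r
    by_cases hl : cs.length > 1
    · obtain ⟨c, t, rfl⟩ : ∃ c t, cs = c :: t := by
        cases cs with
        | nil => simp at hl
        | cons a b => exact ⟨a, b, rfl⟩
      have ht : t ≠ [] := by
        intro h; subst h; simp at hl
      obtain ⟨mid, d, rfl⟩ : ∃ mid d, t = mid ++ [d] := by
        refine ⟨t.dropLast, t.getLast ht, ?_⟩
        exact (List.dropLast_append_getLast ht).symm
      rw [pvALoop]
      rw [dif_pos hl, pvSlice1neg1]
      have hmid : (c :: (mid ++ [d])).tail.dropLast = mid := by simp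
      rw [hmid]
      have hlen' : mid.length ≤ n := by
        simp at hlen; omega
      rw [ih mid hlen']
      have hget0 : PySem.List.pyGetD (c :: (mid ++ [d])) 0 ' ' = c := PySem.List.pyGetD_zero_cons _ _ _
      have hgetn : PySem.List.pyGetD (c :: (mid ++ [d])) (-1) ' ' = d := by
        have := PySem.List.pyGetD_neg_one_append_singleton (xs := c :: mid) (x := d) (d := ' ')
        simpa using this
      rw [hget0, hgetn, pvS_step]
      ring
    · rw [pvALoop, dif_neg hl]
      have : cs.length / 2 = 0 := by omega
      simp [pvS, this]

lemma pvRes2_fold (cs : List Char) : ∀ (i r s : Int), 1 ≤ i → s = (-1) ^ (i - 1).toNat →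
    ((PySem.List.enumerate cs i).foldl
      (fun (p : Int × Int) e => (p.1 + p.2 * e.1 * pvOrd e.2, -p.2)) (r, s)).1
      = r + ((PySem.List.enumerate cs i).map (fun p => pvOrd p.2 * p.1 * (-1) ^ (p.1 - 1).toNat)).sum := by
  induction cs with
  | nil => intro i r s _ _; simp [PySem.List.enumerate_nil]
  | cons c t ih =>
    intro i r s hi hs
    rw [PySem.List.enumerate_cons]
    simp only [List.foldl_cons, List.map_cons, List.sum_cons]
    have hs' : -s = (-1) ^ ((i + 1) - 1).toNat := by
      have h1 : ((i + 1) - 1).toNat = (i - 1).toNat + 1 := by omega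
      rw [h1, pow_succ, hs]; ring
    rw [ih (i+1) (r + s * i * pvOrd c) (-s) (by omega) hs']
    rw [hs]
    ring

lemma pvBRes2_eq (cs : List Char) : pvBRes2 cs = pvARes2 cs := by
  have := pvRes2_fold cs 1 0 1 le_rfl (by norm_num)
  simpa [pvBRes2, pvARes2] using this

-- ===== VERDICT (by name: the statement is the Claim_ definition above) =====
theorem hash_function_spec : Claim_equal_hash_function := by
  intro obj _
  unfold Spec_hash_function hash_function hash_function_alt
  simp only []
  rw [pvALoop_eq obj.toList.length obj.toList le_rfl 0, pvBRes1_eq_S, pvBRes2_eq]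
  simp
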